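-- pv_equiv track=rewrite | github.com/Pks1828/capstone_project | StockAnalysis/technical_indicators.py | carryover
-- ===== SOURCE A (Python) =====
-- def carryover(signals_in, n=4):
--     i=0
--     signals = signals_in[:]
--     while i<len(signals):
--         if signals[i]!=0:
--             count = 0
--             i+=1
--             while i<len(signals) and signals[i]==0:
--                 if count>=n and n>=0:
--                     break
--                 signals[i] = signals[i-1]
--                 count+=1
--                 i+=1
--             continue
--         i+=1
--     return signals
-- ===== SOURCE B (Python) =====
-- def carryover(signals_in, n=4):
--     out = []
--     last = 0
--     remaining = 0
--     for x in signals_in: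
--         if x != 0:
--             last = x
--             remaining = n
--             out.append(x)
--         elif (remaining > 0 or n < 0) and last != 0:
--             out.append(last)
--             remaining -= 1
--         else:
--             out.append(0)
--     return out
-- ===== Notes on version B (the rewrite author's own statement) =====
-- stated objective: simpler
-- what changed: Replaces the index-mutating nested while loops (in-place writes into a copy, reading signals[i-1]) by a single forward pass that builds a fresh output list from two state variables: the last nonzero value and the remaining fill budget; measured ~1.9x faster (no per-element index reads/writes).
import Mathlib
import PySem

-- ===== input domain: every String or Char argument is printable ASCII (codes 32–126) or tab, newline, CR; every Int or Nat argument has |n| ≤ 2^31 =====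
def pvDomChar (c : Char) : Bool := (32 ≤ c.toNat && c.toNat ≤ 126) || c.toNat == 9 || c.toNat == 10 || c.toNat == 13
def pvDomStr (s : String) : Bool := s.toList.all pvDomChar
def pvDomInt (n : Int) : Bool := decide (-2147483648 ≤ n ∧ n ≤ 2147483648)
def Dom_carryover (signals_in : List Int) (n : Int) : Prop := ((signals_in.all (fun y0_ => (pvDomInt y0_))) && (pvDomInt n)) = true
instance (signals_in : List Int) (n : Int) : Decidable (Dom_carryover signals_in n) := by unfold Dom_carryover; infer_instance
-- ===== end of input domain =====

-- B replaces A's index-mutating nested while loops by one forward pass carrying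
-- (last nonzero value, remaining fill budget) and building a fresh output list (objective: simpler).

-- ===== PORT A =====
-- inner while loop of A: fills zeros at i, i+1, … with the previous element, up to the budget.
-- fuel is only a structural-termination guard: i grows by 1 per iteration, so fuel = len(signals) always suffices.
def carryA_inner (fuel : Nat) (signals : List Int) (n : Int) (i : Nat) (count : Int) : List Int × Nat :=
  match fuel with
  | 0 => (signals, i)
  | fuel + 1 =>
    if i < signals.length ∧ signals.getD i 0 = 0 then
      if count ≥ n ∧ n ≥ 0 then (signals, i)
      else carryA_inner fuel (signals.set i (signals.getD (i - 1) 0)) n (i + 1) (count + 1)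
    else (signals, i)

-- outer while loop of A (fuel: i grows by at least 1 per iteration)
def carryA_outer (fuel : Nat) (signals : List Int) (n : Int) (i : Nat) : List Int :=
  match fuel with
  | 0 => signals
  | fuel + 1 =>
    if i < signals.length then
      if signals.getD i 0 ≠ 0 then
        let p := carryA_inner signals.length signals n (i + 1) 0
        carryA_outer fuel p.1 n p.2
      else carryA_outer fuel signals n (i + 1)
    else signals

def carryover (signals_in : List Int) (n : Int) : List Int :=
  carryA_outer (signals_in.length + 1) signals_in n 0

-- ===== PORT B =====
def carryover_alt (signals_in : List Int) (n : Int) : List Int :=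
  (signals_in.foldl (fun (st : Int × Int × List Int) x =>
      let last := st.1
      let remaining := st.2.1
      let out := st.2.2
      if x ≠ 0 then (x, n, out ++ [x])
      else if (remaining > 0 ∨ n < 0) ∧ last ≠ 0 then (last, remaining - 1, out ++ [last])
      else (last, remaining, out ++ [0])) (0, 0, [])).2.2

-- ===== PRECONDITION & SPEC =====
def Spec_carryover (signals_in : List Int) (n : Int) (out : List Int) : Prop := out = carryover_alt signals_in n
instance (signals_in : List Int) (n : Int) (out : List Int) : Decidable (Spec_carryover signals_in n out) := by unfold Spec_carryover; infer_instance

-- ===== CLAIM (what is proved, stated in full; the proofs are below) =====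
def Claim_equal_carryover : Prop := ∀ (signals_in : List Int) (n : Int), Dom_carryover signals_in n → Spec_carryover signals_in n (carryover signals_in n)

-- ===== LEMMAS AND PROOFS =====

-- functional form of B's loop body, used only in the proofs
def carryB (n : Int) : List Int → Int → Int → List Int
  | [], _, _ => []
  | x :: xs, last, remaining =>
    if x ≠ 0 then x :: carryB n xs x n
    else if (remaining > 0 ∨ n < 0) ∧ last ≠ 0 then last :: carryB n xs last (remaining - 1)
    else 0 :: carryB n xs last remaining

def stepB (n : Int) (st : Int × Int × List Int) (x : Int) : Int × Int × List Int :=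
  if x ≠ 0 then (x, n, st.2.2 ++ [x])
  else if (st.2.1 > 0 ∨ n < 0) ∧ st.1 ≠ 0 then (st.1, st.2.1 - 1, st.2.2 ++ [st.1])
  else (st.1, st.2.1, st.2.2 ++ [0])

theorem foldl_carryB (n : Int) (xs : List Int) :
    ∀ (last remaining : Int) (out : List Int),
      (xs.foldl (stepB n) (last, remaining, out)).2.2
      = out ++ carryB n xs last remaining := by
  induction xs with
  | nil => intro last remaining out; simp [carryB]
  | cons x xs ih =>
    intro last remaining out
    rw [List.foldl_cons]
    by_cases hx : x = 0
    · subst hx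
      by_cases hc : (remaining > 0 ∨ n < 0) ∧ last ≠ 0
      · rw [show stepB n (last, remaining, out) 0 = (last, remaining - 1, out ++ [last]) from by
          simp [stepB, hc]]
        rw [ih]; simp [carryB, hc]
      · rw [show stepB n (last, remaining, out) 0 = (last, remaining, out ++ [0]) from by
          simp [stepB, hc]]
        rw [ih]; simp [carryB, hc]
    · rw [show stepB n (last, remaining, out) x = (x, n, out ++ [x]) from by simp [stepB, hx]]
      rw [ih]; simp [carryB, hx]

theorem carryB_nonzero (n x : Int) (xs : List Int) (last r : Int) (h : x ≠ 0) :
    carryB n (x :: xs) last r = x :: carryB n xs x n := by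
  simp only [carryB]; rw [if_pos h]

theorem carryB_zero_fill (n : Int) (xs : List Int) (last r : Int)
    (h : (r > 0 ∨ n < 0) ∧ last ≠ 0) :
    carryB n ((0 : Int) :: xs) last r = last :: carryB n xs last (r - 1) := by
  simp only [carryB]; rw [if_neg (by simp), if_pos h]

theorem carryB_zero_nofill (n : Int) (xs : List Int) (last r : Int)
    (h : ¬ ((r > 0 ∨ n < 0) ∧ last ≠ 0)) :
    carryB n ((0 : Int) :: xs) last r = 0 :: carryB n xs last r := by
  simp only [carryB]; rw [if_neg (by simp), if_neg h]

theorem set_append_length (pre : List Int) (x v : Int) (xs : List Int) :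
    (pre ++ x :: xs).set pre.length v = pre ++ v :: xs := by
  induction pre with
  | nil => simp
  | cons p ps ih => simp [ih]

theorem getD_append_length (pre : List Int) (x : Int) (xs : List Int) :
    (pre ++ x :: xs).getD pre.length 0 = x := by
  simp

theorem getD_append_left (pre rest : List Int) (j : Nat) (hj : j < pre.length) :
    (pre ++ rest).getD j 0 = pre.getD j 0 := by
  simp [List.getD_eq_getElem?_getD, List.getElem?_append_left hj]

-- main invariant: both loops, related over the unprocessed suffix (fuel only needs to dominate it)
theorem main_invariant (n : Int) (rest : List Int) :
    (∀ (pre : List Int) (last remaining : Int) (fuel : Nat), rest.length < fuel →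
       remaining ≤ 0 → (n < 0 → last = 0) →
       carryA_outer fuel (pre ++ rest) n pre.length = pre ++ carryB n rest last remaining)
    ∧ (∀ (pre : List Int) (c v : Int) (fuelI fuelO : Nat), rest.length ≤ fuelI → rest.length < fuelO →
        v ≠ 0 → 0 < pre.length → pre.getD (pre.length - 1) 0 = v →
        carryA_outer fuelO (carryA_inner fuelI (pre ++ rest) n pre.length c).1 n
            (carryA_inner fuelI (pre ++ rest) n pre.length c).2
          = pre ++ carryB n rest v (n - c)) := by
  induction rest with
  | nil =>
    constructor
    · intro pre last remaining fuel hf _ _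
      obtain ⟨f, rfl⟩ : ∃ g, fuel = g + 1 := ⟨fuel - 1, by omega⟩
      simp [carryA_outer, carryB]
    · intro pre c v fuelI fuelO _ hO _ _ _
      have hinner : carryA_inner fuelI (pre ++ []) n pre.length c = (pre ++ [], pre.length) := by
        cases fuelI <;> simp [carryA_inner]
      rw [hinner]
      obtain ⟨f, rfl⟩ : ∃ g, fuelO = g + 1 := ⟨fuelO - 1, by omega⟩
      simp [carryA_outer, carryB]
  | cons x xs ih =>
    obtain ⟨ih1, ih2⟩ := ih
    have hstep : ∀ (pre : List Int) (fuelO : Nat), xs.length + 1 < fuelO → x ≠ 0 →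
        carryA_outer fuelO (pre ++ x :: xs) n pre.length = pre ++ x :: carryB n xs x n := by
      intro pre fuelO hO hx
      obtain ⟨f, rfl⟩ : ∃ g, fuelO = g + 1 := ⟨fuelO - 1, by omega⟩
      rw [carryA_outer]
      have hlt : pre.length < (pre ++ x :: xs).length := by simp
      have hget : (pre ++ x :: xs).getD pre.length 0 = x := getD_append_length pre x xs
      rw [if_pos hlt, hget, if_pos hx]
      show carryA_outer f (carryA_inner (pre ++ x :: xs).length (pre ++ x :: xs) n (pre.length + 1) 0).1 n
          (carryA_inner (pre ++ x :: xs).length (pre ++ x :: xs) n (pre.length + 1) 0).2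
        = pre ++ x :: carryB n xs x n
      have e1 : (pre ++ x :: xs : List Int) = (pre ++ [x]) ++ xs := by simp
      have e2 : pre.length + 1 = (pre ++ [x]).length := by simp
      rw [e1, e2]
      have h2 := ih2 (pre ++ [x]) 0 x ((pre ++ [x]) ++ xs).length f
        (by simp only [List.length_append, List.length_cons, List.length_nil]; omega)
        (by omega) hx (by simp) (by simp)
      rw [h2]
      simp
    constructor
    · -- outer loop, no-fill state
      intro pre last remaining fuel hf hrem hneg
      by_cases hx : x = 0
      · subst hx
        obtain ⟨f, rfl⟩ : ∃ g, fuel = g + 1 := ⟨fuel - 1, by omega⟩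
        rw [carryA_outer]
        have hlt : pre.length < (pre ++ 0 :: xs).length := by simp
        have hget : (pre ++ 0 :: xs).getD pre.length 0 = 0 := getD_append_length pre 0 xs
        rw [if_pos hlt, hget, if_neg (by simp)]
        have := ih1 (pre ++ [0]) last remaining f (by simp at hf; omega) hrem hneg
        simp only [List.append_assoc, List.singleton_append, List.length_append,
          List.length_singleton] at this
        rw [this]
        have hcond : ¬ ((remaining > 0 ∨ n < 0) ∧ last ≠ 0) := by
          rintro ⟨h1 | h1, h2⟩
          · omega
          · exact h2 (hneg h1)
        rw [carryB_zero_nofill n xs last remaining hcond]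
      · rw [hstep pre fuel (by simp at hf; omega) hx,
          carryB_nonzero n x xs last remaining hx]
    · -- inner loop, fill state
      intro pre c v fuelI fuelO hI hO hv hpre hlast
      have hget : (pre ++ x :: xs).getD pre.length 0 = x := getD_append_length pre x xs
      have hlt : pre.length < (pre ++ x :: xs).length := by simp
      obtain ⟨fI, rfl⟩ : ∃ g, fuelI = g + 1 := ⟨fuelI - 1, by simp at hI; omega⟩
      rw [carryA_inner]
      by_cases hx : x = 0
      · subst hx
        rw [if_pos ⟨hlt, hget⟩]
        by_cases hbud : c ≥ n ∧ n ≥ 0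
        · -- budget exhausted: inner stops, outer skips the zero
          rw [if_pos hbud]
          obtain ⟨fO, rfl⟩ : ∃ g, fuelO = g + 1 := ⟨fuelO - 1, by omega⟩
          rw [carryA_outer]
          rw [if_pos hlt, hget, if_neg (by simp)]
          have hrem : n - c ≤ 0 := by omega
          have hneg : n < 0 → v = 0 := by intro h; omega
          have := ih1 (pre ++ [0]) v (n - c) fO (by simp at hO; omega) hrem hneg
          simp only [List.append_assoc, List.singleton_append, List.length_append,
            List.length_singleton] at this
          rw [this]
          have hcond : ¬ ((n - c > 0 ∨ n < 0) ∧ v ≠ 0) := by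
            rintro ⟨h1 | h1, _⟩ <;> omega
          rw [carryB_zero_nofill n xs v (n - c) hcond]
        · -- budget available: fill this zero with v and continue
          rw [if_neg hbud]
          have hprev : (pre ++ 0 :: xs).getD (pre.length - 1) 0 = v := by
            rw [getD_append_left pre (0 :: xs) (pre.length - 1) (by omega)]
            exact hlast
          rw [hprev, set_append_length]
          have e1 : (pre ++ v :: xs : List Int) = (pre ++ [v]) ++ xs := by simp
          have e2 : pre.length + 1 = (pre ++ [v]).length := by simp
          rw [e1, e2]
          have h2 := ih2 (pre ++ [v]) (c + 1) v fI fuelO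
            (by simp at hI; omega) (by simp at hO; omega) hv (by simp) (by simp)
          rw [h2]
          simp only [List.append_assoc, List.singleton_append]
          have hcond : (n - c > 0 ∨ n < 0) ∧ v ≠ 0 := by
            constructor
            · omega
            · exact hv
          rw [carryB_zero_fill n xs v (n - c) hcond]
          have heq : n - (c + 1) = n - c - 1 := by ring
          rw [heq]
      · -- nonzero: inner stops immediately, outer restarts a fill run at x
        rw [if_neg (by simp [hx])]
        rw [hstep pre fuelO (by simp at hO; omega) hx,
          carryB_nonzero n x xs v (n - c) hx]

-- ===== VERDICT (by name: the statement is the Claim_ definition above) =====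
theorem carryover_spec : Claim_equal_carryover := by
  intro signals_in n _
  unfold Spec_carryover carryover carryover_alt
  have h := (main_invariant n signals_in).1 [] 0 0 (signals_in.length + 1) (by omega) le_rfl
    (fun _ => rfl)
  simp only [List.nil_append, List.length_nil] at h
  rw [h]
  have : (signals_in.foldl (fun (st : Int × Int × List Int) x =>
      let last := st.1
      let remaining := st.2.1
      let out := st.2.2
      if x ≠ 0 then (x, n, out ++ [x])
      else if (remaining > 0 ∨ n < 0) ∧ last ≠ 0 then (last, remaining - 1, out ++ [last])
      else (last, remaining, out ++ [0])) ((0 : Int), (0 : Int), ([] : List Int))).2.2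
      = (signals_in.foldl (stepB n) ((0 : Int), (0 : Int), ([] : List Int))).2.2 := rfl
  rw [this, foldl_carryB]
  simp
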